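-- pv_equiv track=rewrite | github.com/maevalesaffre/university_project | l1_infomatique/deuxième semestre/ap1/ds22test.py | protege_adresse
-- ===== SOURCE A (Python) =====
-- protection={'.':"[dot]", '@':"[at]"}
--
-- def protege_adresse(chaine):
--     rep=""
--     for carac in chaine:
--         if carac in protection.keys():
--             rep+= protection[carac]
--         else:
--             rep+= carac
--     return rep
-- ===== SOURCE B (Python) =====
-- def protege_adresse(chaine):
--     return chaine.replace('.', "[dot]").replace('@', "[at]")
-- ===== Notes on version B (the rewrite author's own statement) =====
-- stated objective: faster
-- what changed: The manual per-character loop with a dict lookup and repeated string concatenation is replaced by two whole-string str.replace passes; order is safe since the inserted tokens contain no dot or at-sign characters.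
import Mathlib
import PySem

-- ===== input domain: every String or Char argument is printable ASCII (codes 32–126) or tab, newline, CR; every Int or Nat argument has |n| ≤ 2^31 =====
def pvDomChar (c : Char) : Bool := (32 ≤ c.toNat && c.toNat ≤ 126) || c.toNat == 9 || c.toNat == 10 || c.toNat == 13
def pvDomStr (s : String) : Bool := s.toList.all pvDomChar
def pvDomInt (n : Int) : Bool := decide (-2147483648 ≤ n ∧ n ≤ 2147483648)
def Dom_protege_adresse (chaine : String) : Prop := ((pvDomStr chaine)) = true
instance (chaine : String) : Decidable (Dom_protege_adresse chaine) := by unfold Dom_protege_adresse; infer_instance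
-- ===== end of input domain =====

-- B replaces A's per-character loop (dict lookup + string concatenation) by two
-- whole-string str.replace passes; idiomatic rewrite, same return value.

-- ===== PORT A =====
-- module-level dict 'protection'
def protection : PySem.Dict Char String :=
  PySem.Dict.mk [('.', "[dot]"), ('@', "[at]")]

def protege_adresse (chaine : String) : String :=
  -- for carac in chaine: if carac in protection.keys(): rep += protection[carac] else rep += carac
  -- (protection[carac] is reached only when the key is present, so getD never uses its default)
  chaine.toList.foldl
    (fun rep carac =>
      if protection.contains carac then rep ++ (protection.get? carac).getD ""
      else rep ++ String.singleton carac) ""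

-- ===== PORT B =====
def protege_adresse_alt (chaine : String) : String :=
  PySem.Str.replace (PySem.Str.replace chaine "." "[dot]") "@" "[at]"

-- ===== PRECONDITION & SPEC =====
def Spec_protege_adresse (chaine : String) (out : String) : Prop := out = protege_adresse_alt chaine
instance (chaine : String) (out : String) : Decidable (Spec_protege_adresse chaine out) := by unfold Spec_protege_adresse; infer_instance

-- ===== CLAIM (what is proved, stated in full; the proofs are below) =====
def Claim_equal_protege_adresse : Prop := ∀ (chaine : String), Dom_protege_adresse chaine → Spec_protege_adresse chaine (protege_adresse chaine)

-- ===== LEMMAS AND PROOFS =====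

-- the per-character substitution both programs implement
def pvEsc (c : Char) : List Char :=
  if c = '.' then "[dot]".toList else if c = '@' then "[at]".toList else [c]

-- replace with a single-character pattern is a per-character flatMap (go, with enough fuel)
theorem go_single (o : Char) (new : List Char) :
    ∀ (l : List Char) (fuel : Nat) (acc : List Char), l.length ≤ fuel →
      PySem.Chars.replace.go [o] new fuel l acc
        = acc.reverse ++ l.flatMap (fun c => if c = o then new else [c]) := by
  intro l
  induction l with
  | nil =>
    intro fuel acc _
    cases fuel <;> simp [PySem.Chars.replace.go]
  | cons c t ih =>
    intro fuel acc h
    cases fuel with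
    | zero => simp at h
    | succ f =>
      rw [PySem.Chars.replace.go]
      by_cases hc : c = o
      · subst hc
        simp only [List.isPrefixOf, beq_self_eq_true, Bool.true_and, if_true,
          List.length_cons, List.drop_succ_cons, List.length_nil, List.drop_zero]
        rw [ih f (new.reverse ++ acc) (by simpa using h)]
        simp
      · have hp : ([o].isPrefixOf (c :: t)) = false := by
          simp [List.isPrefixOf]; intro h'; exact absurd h'.symm hc
        rw [hp]
        simp only [Bool.false_eq_true, if_false]
        rw [ih f (c :: acc) (by simpa using h)]
        simp [hc]

theorem replace_single (o : Char) (new l : List Char) :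
    PySem.Chars.replace l [o] new
      = l.flatMap (fun c => if c = o then new else [c]) := by
  unfold PySem.Chars.replace
  simp only [List.isEmpty_cons, Bool.false_eq_true, if_false]
  simpa using go_single o new l l.length [] le_rfl

-- the two passes of B fuse into one pvEsc pass (the tokens contain no '.' or '@')
theorem two_passes (l : List Char) :
    (l.flatMap (fun c => if c = '.' then "[dot]".toList else [c])).flatMap
        (fun c => if c = '@' then "[at]".toList else [c])
      = l.flatMap pvEsc := by
  induction l with
  | nil => rfl
  | cons c t ih =>
    simp only [List.flatMap_cons, List.flatMap_append, ih]
    congr 1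
    by_cases h1 : c = '.'
    · subst h1; rfl
    · by_cases h2 : c = '@'
      · subst h2; rfl
      · simp [pvEsc, h1, h2]

-- A's loop, characterised: the accumulated string's characters
theorem loopA (l : List Char) (r : String) :
    (l.foldl
      (fun rep carac =>
        if protection.contains carac then rep ++ (protection.get? carac).getD ""
        else rep ++ String.singleton carac) r).toList
      = r.toList ++ l.flatMap pvEsc := by
  induction l generalizing r with
  | nil => simp
  | cons c t ih =>
    simp only [List.foldl_cons, ih, List.flatMap_cons, ← List.append_assoc]
    congr 2
    by_cases h1 : c = '.'
    · subst h1
      simp only [show protection.contains '.' = true from rfl, if_true,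
        show (protection.get? '.').getD "" = "[dot]" from rfl]
      simp [pvEsc]
    · by_cases h2 : c = '@'
      · subst h2
        simp only [show protection.contains '@' = true from rfl, if_true,
          show (protection.get? '@').getD "" = "[at]" from rfl]
        simp [pvEsc]
      · have hc : protection.contains c = false := by
          simp [protection, PySem.Dict.contains]
          exact ⟨fun h => h1 h.symm, fun h => h2 h.symm⟩
        simp [hc, pvEsc, h1, h2]

-- ===== VERDICT (by name: the statement is the Claim_ definition above) =====
theorem protege_adresse_spec : Claim_equal_protege_adresse := by
  intro chaine _
  unfold Spec_protege_adresse
  apply String.ext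
  show (protege_adresse chaine).toList = (protege_adresse_alt chaine).toList
  rw [protege_adresse, protege_adresse_alt, loopA]
  simp only [PySem.Str.toList_replace]
  rw [show ("." : String).toList = ['.'] from rfl,
      show ("@" : String).toList = ['@'] from rfl,
      replace_single, replace_single, two_passes]
  rfl
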